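-- pv_equiv track=rewrite | github.com/rastsislaux/bsuir | semester-2/PIOIVIS/LW3/multisetlib/parser.py | _unite_set_token
-- ===== SOURCE A (Python) =====
-- def _unite_set_token(s: list, open_s: str, close_s: str):
--     """
--     This method unites tuples and multisets after splitting them by comma
--     :param s: list of strings from string splitted by comma
--     :param open_s: opening symbol
--     :param close_s: closing symbol
--     :return: list of strings with united tuples and multisets
--     """
--     cpy = s.copy()
--     i, ignore, concat = 0, 0, False
--     while i < len(cpy):
--
--         concatenated = False
--         if concat:
--             cpy[i - 1] += ',' + cpy[i]
--             concatenated = True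
--
--         if cpy[i][0] == open_s:
--             if concat:
--                 ignore += 1
--             else:
--                 concat = True
--
--         if cpy[i][-1] == close_s:
--             if ignore != 0:
--                 ignore -= 1
--             else:
--                 concat = False
--
--         if concatenated:
--             cpy.pop(i)
--             i -= 1
--
--         i += 1
--
--     return cpy
-- ===== SOURCE B (Python) =====
-- def _unite_set_token(s: list, open_s: str, close_s: str):
--     """Single out-of-place pass: group tokens by nesting level, then join each
--     group with commas (no in-place merge/pop, no mutation of the result mid-scan)."""
--     groups = []
--     cur = None
--     level = 0
--     for tok in s:
--         if level == 0:
--             if cur is not None: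
--                 groups.append(cur)
--             cur = [tok]
--         else:
--             cur.append(tok)
--         if tok[0] == open_s:
--             level += 1
--         if tok[-1] == close_s:
--             level = max(level - 1, 0)
--     if cur is not None:
--         groups.append(cur)
--     return [','.join(g) for g in groups]
-- ===== Notes on version B (the rewrite author's own statement) =====
-- stated objective: simpler
-- what changed: A merges tokens in place (cpy[i-1] += ',' + cpy[i]; cpy.pop(i)) inside an index-juggling while-loop with a concat flag plus a separate ignore counter; B does one out-of-place pass that collects tokens into level-grouped lists using a single nesting-level counter and joins each group with commas at the end, never mutating the list it scans.
import Mathlib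
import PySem

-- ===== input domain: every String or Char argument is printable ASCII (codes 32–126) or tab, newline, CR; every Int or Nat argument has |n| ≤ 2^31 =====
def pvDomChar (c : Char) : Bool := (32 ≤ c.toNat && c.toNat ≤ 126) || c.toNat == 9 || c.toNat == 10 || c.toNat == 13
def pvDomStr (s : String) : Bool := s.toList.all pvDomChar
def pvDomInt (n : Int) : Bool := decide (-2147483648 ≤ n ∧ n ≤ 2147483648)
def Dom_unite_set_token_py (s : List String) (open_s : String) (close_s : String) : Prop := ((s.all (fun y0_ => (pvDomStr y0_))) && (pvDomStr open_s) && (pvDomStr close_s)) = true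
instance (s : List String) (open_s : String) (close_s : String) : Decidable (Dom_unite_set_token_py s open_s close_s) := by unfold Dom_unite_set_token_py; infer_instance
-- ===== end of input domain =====

-- B rewrites A's in-place merge/pop while-loop as one out-of-place grouping pass
-- plus a final join (objective: simpler; return value only — A copies its input, neither mutates the argument).

-- ===== PORT A =====
-- shared primitive: Python's `tok[k] == sym` (a 1-char string compared with sym;
-- tok[k] on an empty tok raises IndexError — those inputs are excluded by Pre_ below,
-- and there the port treats the comparison as False)
def pvSymEq (oc : Option Char) (sym : String) : Bool :=
  match oc with
  | some ch => sym.toList == [ch]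
  | none => false

-- the flag update of one iteration of A's while-loop (the two `if` blocks on cpy[i]);
-- `ignore` is Python's int counter: it is only ever decremented under `ignore != 0`,
-- so it stays ≥ 0 and Nat is exact
def pvFlagsA (open_s close_s tok : String) (ignore : Nat) (concat : Bool) : Nat × Bool :=
  let p1 : Nat × Bool :=
    if pvSymEq (PySem.Str.pyGet? tok 0) open_s then
      (if concat then (ignore + 1, concat) else (ignore, true))
    else (ignore, concat)
  if pvSymEq (PySem.Str.pyGet? tok (-1)) close_s then
    (if p1.1 ≠ 0 then (p1.1 - 1, p1.2) else (p1.1, false))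
  else p1

-- the merge of one iteration: when `concat`, Python does cpy[i-1] += ',' + cpy[i]
def pvMerge (cpy : List String) (i : Nat) (concat : Bool) : List String :=
  if concat then cpy.set (i - 1) (cpy.getD (i - 1) "" ++ "," ++ cpy.getD i "") else cpy

theorem pvMerge_length (cpy : List String) (i : Nat) (concat : Bool) :
    (pvMerge cpy i concat).length = cpy.length := by
  unfold pvMerge; split <;> simp

-- A's while-loop; in the `concat` branch Python does i -= 1; i += 1 after pop(i),
-- so the net index is again i.  (In every state reachable from the entry call,
-- concat = true implies 1 ≤ i, so `i - 1` is Python's `i - 1`.)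
def uniteLoopA (open_s close_s : String) (cpy : List String) (i ignore : Nat) (concat : Bool) : List String :=
  if h : i < cpy.length then
    let cpy1 := pvMerge cpy i concat
    let p := pvFlagsA open_s close_s (cpy1.getD i "") ignore concat
    if concat then uniteLoopA open_s close_s (cpy1.eraseIdx i) i p.1 p.2
    else uniteLoopA open_s close_s cpy1 (i + 1) p.1 p.2
  else cpy
termination_by cpy.length - i
decreasing_by
  · have h1 := pvMerge_length cpy i concat
    have h2 : ((pvMerge cpy i concat).eraseIdx i).length = (pvMerge cpy i concat).length - 1 := by
      rw [List.length_eraseIdx_of_lt]; omega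
    omega
  · have h1 := pvMerge_length cpy i concat
    omega

def unite_set_token_py (s : List String) (open_s : String) (close_s : String) : List String :=
  uniteLoopA open_s close_s s 0 0 false

-- ===== PORT B =====
-- one step of B's for-loop: place tok (new group at level 0, else append to the
-- current group), then update the nesting level; Python's max(level-1, 0) is Nat's
-- saturating `- 1`
def altStep (open_s close_s : String)
    (st : List (List String) × Option (List String) × Nat) (tok : String) :
    List (List String) × Option (List String) × Nat :=
  match st with
  | (groups, cur, level) =>
    let gc : List (List String) × Option (List String) :=
      if level = 0 then
        ((match cur with | some g => groups ++ [g] | none => groups), some [tok])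
      else (groups, cur.map (fun g => g ++ [tok]))
    let l1 := if pvSymEq (PySem.Str.pyGet? tok 0) open_s then level + 1 else level
    let l2 := if pvSymEq (PySem.Str.pyGet? tok (-1)) close_s then l1 - 1 else l1
    (gc.1, gc.2, l2)

def unite_set_token_py_alt (s : List String) (open_s : String) (close_s : String) : List String :=
  let fin := s.foldl (altStep open_s close_s) ([], none, 0)
  (match fin.2.1 with | some g => fin.1 ++ [g] | none => fin.1).map
    (fun g => PySem.Str.join "," g)

-- ===== PRECONDITION & SPEC =====
-- Pre_ excludes exactly the inputs containing an empty token, on which Python A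
-- raises IndexError at `cpy[i][0]` (B raises there too); on all other inputs A returns.
def Pre_unite_set_token_py (s : List String) (open_s : String) (close_s : String) : Prop :=
  ∀ t ∈ s, t ≠ ""
instance (s : List String) (open_s : String) (close_s : String) : Decidable (Pre_unite_set_token_py s open_s close_s) := by unfold Pre_unite_set_token_py; infer_instance

def pvWitness_unite_set_token_py : List String × String × String := (["{1", "2}", "a"], "{", "}")

def Spec_unite_set_token_py (s : List String) (open_s : String) (close_s : String) (out : List String) : Prop := out = unite_set_token_py_alt s open_s close_s
instance (s : List String) (open_s : String) (close_s : String) (out : List String) : Decidable (Spec_unite_set_token_py s open_s close_s out) := by unfold Spec_unite_set_token_py; infer_instance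

-- ===== CLAIM (what is proved, stated in full; the proofs are below) =====
def Claim_equal_unite_set_token_py : Prop := ∀ (s : List String) (open_s : String) (close_s : String), Dom_unite_set_token_py s open_s close_s → Pre_unite_set_token_py s open_s close_s → Spec_unite_set_token_py s open_s close_s (unite_set_token_py s open_s close_s)

-- ===== LEMMAS AND PROOFS =====

-- the common middle form: the level update of one token …
def pvStep (open_s close_s tok : String) (level : Nat) : Nat :=
  let l1 := if pvSymEq (PySem.Str.pyGet? tok 0) open_s then level + 1 else level
  if pvSymEq (PySem.Str.pyGet? tok (-1)) close_s then l1 - 1 else l1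

-- … and the grouped scan both ports compute: `cur` is the group being built,
-- `level` the nesting after its tokens
def pvGo (open_s close_s : String) (cur : String) (level : Nat) : List String → List String
  | [] => [cur]
  | tok :: rest =>
    if level = 0 then cur :: pvGo open_s close_s tok (pvStep open_s close_s tok 0) rest
    else pvGo open_s close_s (cur ++ "," ++ tok) (pvStep open_s close_s tok level) rest

-- B's finalisation, named for the proofs
def altFinish (fin : List (List String) × Option (List String) × Nat) : List String :=
  (match fin.2.1 with | some g => fin.1 ++ [g] | none => fin.1).map
    (fun g => PySem.Str.join "," g)

theorem chars_join_snoc (sep : List Char) (ps : List (List Char)) (p : List Char) (h : ps ≠ []) :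
    PySem.Chars.join sep (ps ++ [p]) = PySem.Chars.join sep ps ++ sep ++ p := by
  induction ps with
  | nil => simp at h
  | cons a rest ih =>
    cases rest with
    | nil => simp [PySem.Chars.join_cons_cons, PySem.Chars.join_singleton]
    | cons b r =>
      rw [List.cons_append, List.cons_append, PySem.Chars.join_cons_cons,
        ← List.cons_append, ih (by simp), PySem.Chars.join_cons_cons]
      simp

theorem str_join_snoc (l : List String) (t : String) (h : l ≠ []) :
    PySem.Str.join "," (l ++ [t]) = PySem.Str.join "," l ++ "," ++ t := by
  simp only [PySem.Str.join, List.map_append, List.map_cons, List.map_nil]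
  rw [chars_join_snoc _ _ _ (by simpa using h)]
  apply String.toList_inj.mp
  simp

theorem str_join_singleton (t : String) : PySem.Str.join "," [t] = t := by
  simp [PySem.Str.join]

theorem getD_append_length {α : Type} (pre : List α) (x : α) (rest : List α) (d : α) :
    (pre ++ x :: rest).getD pre.length d = x := by
  simp [List.getD]

theorem set_append_length {α : Type} (pre : List α) (x v : α) (rest : List α) :
    (pre ++ x :: rest).set pre.length v = pre ++ v :: rest := by
  rw [List.set_append_right _ _ (Nat.le_refl pre.length)]
  simp

theorem pvMerge_false (cpy : List String) (i : Nat) : pvMerge cpy i false = cpy := rfl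

theorem pvMerge_true (front : List String) (cur t : String) (rest : List String) :
    pvMerge (front ++ cur :: t :: rest) (front.length + 1) true
      = front ++ (cur ++ "," ++ t) :: t :: rest := by
  unfold pvMerge
  rw [if_pos rfl, show front.length + 1 - 1 = front.length by omega,
    getD_append_length front cur (t :: rest) ""]
  have hget2 : (front ++ cur :: t :: rest).getD (front.length + 1) "" = t := by
    rw [show front ++ cur :: t :: rest = (front ++ [cur]) ++ t :: rest by simp,
      show front.length + 1 = (front ++ [cur]).length by simp]
    exact getD_append_length (front ++ [cur]) t rest ""
  rw [hget2]
  exact set_append_length front cur (cur ++ "," ++ t) (t :: rest)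

-- the flag pair of A corresponds to the level of the middle form
theorem pvFlagsA_level (o c tok : String) (ignore : Nat) (concat : Bool)
    (h : concat = false → ignore = 0) :
    ((if (pvFlagsA o c tok ignore concat).2 then (pvFlagsA o c tok ignore concat).1 + 1 else 0)
        = pvStep o c tok (if concat then ignore + 1 else 0))
    ∧ ((pvFlagsA o c tok ignore concat).2 = false → (pvFlagsA o c tok ignore concat).1 = 0) := by
  unfold pvFlagsA pvStep
  cases concat <;> simp_all <;> split_ifs <;> simp_all <;> omega

-- A's loop computes the middle form
theorem uniteLoopA_go (o c : String) :
    ∀ (rest front : List String) (cur : String) (ignore : Nat) (concat : Bool),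
    (concat = false → ignore = 0) →
    uniteLoopA o c (front ++ cur :: rest) (front.length + 1) ignore concat
      = front ++ pvGo o c cur (if concat then ignore + 1 else 0) rest := by
  intro rest
  induction rest with
  | nil =>
    intro front cur ignore concat h
    rw [uniteLoopA]
    simp [pvGo]
  | cons t r ih =>
    intro front cur ignore concat h
    rw [uniteLoopA]
    have hlt : front.length + 1 < (front ++ cur :: t :: r).length := by
      simp only [List.length_append, List.length_cons]; omega
    rw [dif_pos hlt]
    cases concat with
    | false =>
      simp only [pvMerge_false, if_neg (Bool.false_ne_true)]
      have hget2 : (front ++ cur :: t :: r).getD (front.length + 1) "" = t := by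
        rw [show front ++ cur :: t :: r = (front ++ [cur]) ++ t :: r by simp,
          show front.length + 1 = (front ++ [cur]).length by simp]
        exact getD_append_length (front ++ [cur]) t r ""
      rw [hget2]
      have h0 := h rfl
      subst h0
      have hfl := pvFlagsA_level o c t 0 false (fun _ => rfl)
      rw [show front ++ cur :: t :: r = (front ++ [cur]) ++ t :: r by simp,
        show front.length + 1 + 1 = (front ++ [cur]).length + 1 by simp,
        ih (front ++ [cur]) t (pvFlagsA o c t 0 false).1 (pvFlagsA o c t 0 false).2 hfl.2,
        hfl.1]
      simp [pvGo]
    | true =>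
      simp only [pvMerge_true]
      have hget3 : (front ++ (cur ++ "," ++ t) :: t :: r).getD (front.length + 1) "" = t := by
        rw [show front ++ (cur ++ "," ++ t) :: t :: r = (front ++ [cur ++ "," ++ t]) ++ t :: r by simp,
          show front.length + 1 = (front ++ [cur ++ "," ++ t]).length by simp]
        exact getD_append_length _ t r ""
      rw [hget3]
      have herase : (front ++ (cur ++ "," ++ t) :: t :: r).eraseIdx (front.length + 1)
          = front ++ (cur ++ "," ++ t) :: r := by
        rw [show front ++ (cur ++ "," ++ t) :: t :: r = (front ++ [cur ++ "," ++ t]) ++ t :: r by simp,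
          show front.length + 1 = (front ++ [cur ++ "," ++ t]).length by simp,
          List.eraseIdx_append_of_length_le (Nat.le_refl (front ++ [cur ++ "," ++ t]).length)]
        simp
      rw [herase]
      have hfl := pvFlagsA_level o c t ignore true (fun hc => by simp at hc)
      rw [ih front (cur ++ "," ++ t) (pvFlagsA o c t ignore true).1 (pvFlagsA o c t ignore true).2 hfl.2]
      simp only [pvGo]
      rw [hfl.1]
      simp

-- B's fold computes the middle form
theorem altGo_join (o c : String) :
    ∀ (rest : List String) (groups : List (List String)) (curL : List String), curL ≠ [] →
    ∀ (level : Nat),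
    altFinish (rest.foldl (altStep o c) (groups, some curL, level))
      = groups.map (fun g => PySem.Str.join "," g)
          ++ pvGo o c (PySem.Str.join "," curL) level rest := by
  intro rest
  induction rest with
  | nil =>
    intro groups curL hne level
    simp [altFinish, pvGo]
  | cons t r ih =>
    intro groups curL hne level
    rw [List.foldl_cons]
    by_cases h0 : level = 0
    · subst h0
      have hstep : altStep o c (groups, some curL, 0) t
          = (groups ++ [curL], some [t], pvStep o c t 0) := by
        simp [altStep, pvStep]
      rw [hstep, ih (groups ++ [curL]) [t] (by simp) (pvStep o c t 0)]
      simp only [pvGo, str_join_singleton]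
      simp
    · have hstep : altStep o c (groups, some curL, level) t
        = (groups, some (curL ++ [t]), pvStep o c t level) := by
        simp [altStep, pvStep, h0]
      rw [hstep, ih groups (curL ++ [t]) (by simp) (pvStep o c t level)]
      rw [str_join_snoc curL t hne]
      simp only [pvGo, if_neg h0]

theorem ports_eq (s : List String) (o c : String) :
    unite_set_token_py s o c = unite_set_token_py_alt s o c := by
  cases s with
  | nil =>
    rw [unite_set_token_py, uniteLoopA]
    rfl
  | cons t r =>
    -- A side: unfold the first iteration, then apply the loop lemma
    rw [unite_set_token_py, uniteLoopA]
    have hlt : 0 < (t :: r).length := by simp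
    rw [dif_pos hlt]
    simp only [pvMerge_false, if_neg (Bool.false_ne_true)]
    have hget : (t :: r).getD 0 "" = t := rfl
    rw [hget]
    have hfl := pvFlagsA_level o c t 0 false (fun _ => rfl)
    have hA : uniteLoopA o c (t :: r) 1 (pvFlagsA o c t 0 false).1 (pvFlagsA o c t 0 false).2
        = pvGo o c t (pvStep o c t 0) r := by
      have := uniteLoopA_go o c r [] t (pvFlagsA o c t 0 false).1 (pvFlagsA o c t 0 false).2 hfl.2
      simp only [List.nil_append, List.length_nil, Nat.zero_add] at this
      rw [this, hfl.1]
      simp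
    rw [hA]
    -- B side
    have hB : unite_set_token_py_alt (t :: r) o c = pvGo o c t (pvStep o c t 0) r := by
      rw [unite_set_token_py_alt]
      have hstep : altStep o c ([], none, 0) t = ([], some [t], pvStep o c t 0) := by
        simp [altStep, pvStep]
      show altFinish ((t :: r).foldl (altStep o c) ([], none, 0)) = _
      rw [List.foldl_cons, hstep, altGo_join o c r [] [t] (by simp) (pvStep o c t 0)]
      simp [str_join_singleton]
    rw [hB]

-- ===== VERDICT (by name: the statement is the Claim_ definition above) =====
theorem unite_set_token_py_spec : Claim_equal_unite_set_token_py := by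
  intro s o c _ _
  unfold Spec_unite_set_token_py
  exact ports_eq s o c
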